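-- pv_equiv track=rewrite | github.com/kirillstrelkov/playground | auto/adac/usedcar/check_plotly.py | is_suv
-- ===== SOURCE A (Python) =====
-- def is_suv(x):
--     return any(
--         [
--             v.lower() in x.lower()
--             for v in [
--                 "sportage",
--                 "3008",
--                 "tiguan",
--                 "compass",
--                 "yeti",
--                 "rav4",
--                 "grandland",
--                 "karoq",
--                 "ateca",
--                 "scenic",
--                 "tucson",
--             ]
--         ]
--     )
-- ===== SOURCE B (Python) =====
-- _MODELS = (
--     "sportage", "3008", "tiguan", "compass", "yeti", "rav4",
--     "grandland", "karoq", "ateca", "scenic", "tucson",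
-- )
--
--
-- def is_suv(x):
--     # Index the text once: collect every substring of x.lower() whose length is a
--     # possible model-name length into a hash set, then look each model up in it.
--     xl = x.lower()
--     subs = set()
--     for L in sorted({len(m) for m in _MODELS}):
--         for i in range(len(xl) - L + 1):
--             subs.add(xl[i:i + L])
--     return any(m in subs for m in _MODELS)
-- ===== Notes on version B (the rewrite author's own statement) =====
-- stated objective: alternative
-- what changed: B indexes the text instead of searching the patterns: it builds, in one pass per relevant length, a hash set of all substrings of x.lower() of the six model-name lengths, then answers by a constant-time set lookup per model, whereas A runs 11 independent substring-membership searches over the whole string.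
import Mathlib
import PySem

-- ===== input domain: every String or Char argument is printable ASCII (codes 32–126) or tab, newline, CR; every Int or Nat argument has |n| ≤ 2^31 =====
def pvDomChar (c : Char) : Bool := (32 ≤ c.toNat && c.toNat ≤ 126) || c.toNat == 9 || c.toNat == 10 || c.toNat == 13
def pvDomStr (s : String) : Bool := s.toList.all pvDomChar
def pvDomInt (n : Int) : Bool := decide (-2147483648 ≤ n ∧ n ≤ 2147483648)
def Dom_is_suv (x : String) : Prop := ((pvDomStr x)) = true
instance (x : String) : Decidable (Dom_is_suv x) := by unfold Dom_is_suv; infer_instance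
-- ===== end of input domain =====

-- B indexes the text instead of searching the patterns: it builds a set of all substrings
-- of x.lower() of the six model-name lengths, then answers by set lookups (objective: alternative).

-- ===== PORT A =====
def is_suv (x : String) : Bool :=
  (([ "sportage", "3008", "tiguan", "compass", "yeti", "rav4",
      "grandland", "karoq", "ateca", "scenic", "tucson" ] : List String).map
    (fun v => PySem.Str.isIn (PySem.Str.lower v) (PySem.Str.lower x))).any (fun b => b)

-- ===== PORT B =====
def pvModels : List String :=
  [ "sportage", "3008", "tiguan", "compass", "yeti", "rav4",
    "grandland", "karoq", "ateca", "scenic", "tucson" ]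

-- sorted({len(m) for m in _MODELS})
def pvLens : List Int :=
  PySem.List.sorted (PySem.Set.ofList (pvModels.map (fun m => (m.toList.length : Int)))) (fun v => v) false

-- the substring index: for each relevant length L, add every slice xl[i:i+L] to the set
def pvSubs (xl : List Char) : PySem.Set (List Char) :=
  pvLens.foldl
    (fun acc L =>
      (List.range (xl.length + 1 - L.toNat)).foldl
        (fun acc2 (i : Nat) => PySem.Set.add acc2 (PySem.List.slice xl (some (i : Int)) (some ((i : Int) + L))))
        acc)
    PySem.Set.empty

def is_suv_alt (x : String) : Bool :=
  let xl := (PySem.Str.lower x).toList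
  let subs := pvSubs xl
  pvModels.any (fun m => subs.contains m.toList)

-- ===== PRECONDITION & SPEC =====
def Spec_is_suv (x : String) (out : Bool) : Prop := out = is_suv_alt x
instance (x : String) (out : Bool) : Decidable (Spec_is_suv x out) := by unfold Spec_is_suv; infer_instance

-- ===== CLAIM =====
def Claim_equal_is_suv : Prop := ∀ (x : String), Dom_is_suv x → Spec_is_suv x (is_suv x)

-- ===== LEMMAS AND PROOFS =====

-- membership in a fold that only adds elements to a set
theorem pv_mem_foldl_add {β : Type} (l : List β) (g : β → List Char)
    (acc : PySem.Set (List Char)) (y : List Char) :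
    (y ∈ l.foldl (fun a b => PySem.Set.add a (g b)) acc) ↔ y ∈ acc ∨ ∃ b ∈ l, y = g b := by
  induction l generalizing acc with
  | nil => simp
  | cons h t ih =>
    simp only [List.foldl_cons, ih, PySem.Set.mem_add, List.mem_cons]
    constructor
    · rintro (⟨h1 | h1⟩ | ⟨b, hb, rfl⟩)
      · exact Or.inl h1
      · exact Or.inr ⟨h, Or.inl rfl, h1⟩
      · exact Or.inr ⟨b, Or.inr hb, rfl⟩
    · rintro (h1 | ⟨b, (rfl | hb), rfl⟩)
      · exact Or.inl (Or.inl h1)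
      · exact Or.inl (Or.inr rfl)
      · exact Or.inr ⟨b, hb, rfl⟩

-- characterisation of the substring index (generalised over the length list and accumulator)
theorem pv_mem_subs_gen (xl : List Char) (ls : List Int) (acc : PySem.Set (List Char)) (y : List Char) :
    (y ∈ ls.foldl
        (fun acc L =>
          (List.range (xl.length + 1 - L.toNat)).foldl
            (fun acc2 (i : Nat) => PySem.Set.add acc2 (PySem.List.slice xl (some (i : Int)) (some ((i : Int) + L))))
            acc)
        acc) ↔
      y ∈ acc ∨ ∃ L ∈ ls, ∃ i < xl.length + 1 - L.toNat,
        y = PySem.List.slice xl (some (i : Int)) (some ((i : Int) + L)) := by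
  induction ls generalizing acc with
  | nil => simp
  | cons L t ih =>
    simp only [List.foldl_cons, ih, List.mem_cons]
    rw [pv_mem_foldl_add (List.range (xl.length + 1 - L.toNat)) (fun i => PySem.List.slice xl (some (i : Int)) (some ((i : Int) + L)))]
    constructor
    · rintro (⟨h1 | ⟨i, hi, rfl⟩⟩ | ⟨L', hL', i, hi, rfl⟩)
      · exact Or.inl h1
      · exact Or.inr ⟨L, Or.inl rfl, i, List.mem_range.mp hi, rfl⟩
      · exact Or.inr ⟨L', Or.inr hL', i, hi, rfl⟩
    · rintro (h1 | ⟨L', (rfl | hL'), i, hi, rfl⟩)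
      · exact Or.inl (Or.inl h1)
      · exact Or.inl (Or.inr ⟨i, List.mem_range.mpr hi, rfl⟩)
      · exact Or.inr ⟨L', hL', i, hi, rfl⟩

theorem pv_mem_subs (xl : List Char) (y : List Char) :
    y ∈ pvSubs xl ↔
      ∃ L ∈ pvLens, ∃ i < xl.length + 1 - L.toNat,
        y = PySem.List.slice xl (some (i : Int)) (some ((i : Int) + L)) := by
  unfold pvSubs
  rw [pv_mem_subs_gen]
  simp [PySem.Set.empty]

-- small facts about the literal model list, checked by computation
theorem pv_lower_fixed : ∀ v ∈ pvModels, PySem.Str.lower v = v := by decide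
theorem pv_models_facts :
    ∀ m ∈ pvModels, (m.toList.length : Int) ∈ pvLens ∧ m.toList ≠ [] := by decide
theorem pv_lens_nonneg : ∀ L ∈ pvLens, 0 ≤ L := by decide

-- the index lookup equals substring containment, for a pattern of a listed length
theorem pv_contains_eq_isIn (xl : List Char) (m : List Char)
    (hlen : (m.length : Int) ∈ pvLens) (hne : m ≠ []) :
    (pvSubs xl).contains m = PySem.Chars.isIn m xl := by
  rw [Bool.eq_iff_iff, PySem.Set.contains_iff, pv_mem_subs,
    ← PySem.Chars.exists_prefix_drop_iff_isIn]
  constructor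
  · rintro ⟨L, hL, i, hi, rfl⟩
    have h0L : 0 ≤ L := pv_lens_nonneg L hL
    have hLi : (i : Int) + L = ((i + L.toNat : Nat) : Int) := by omega
    rw [hLi, PySem.List.slice_natCast]
    have htk : (i + L.toNat) - i = L.toNat := by omega
    rw [htk]
    exact ⟨i, List.take_prefix _ _⟩
  · rintro ⟨j, hj⟩
    have hml : m.length ≤ xl.length - j := by
      have := hj.length_le
      simpa using this
    have hjlen : j ≤ xl.length := by
      by_contra h
      have : xl.drop j = [] := List.drop_eq_nil_of_le (by omega)
      rw [this] at hj
      exact hne (List.prefix_nil.mp hj)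
    refine ⟨(m.length : Int), hlen, j, by simp; omega, ?_⟩
    have hLi : (j : Int) + (m.length : Int) = ((j + m.length : Nat) : Int) := by omega
    rw [hLi, PySem.List.slice_natCast]
    have htk : (j + m.length) - j = m.length := by omega
    rw [htk]
    exact (List.prefix_iff_eq_take.mp hj)

-- ===== VERDICT =====
theorem is_suv_spec : Claim_equal_is_suv := by
  intro x _
  unfold Spec_is_suv is_suv is_suv_alt
  rw [List.any_map]
  show (pvModels.any _) = _
  refine PySem.List.any_congr_mem ?_
  intro m hm
  obtain ⟨hlen, hne⟩ := pv_models_facts m hm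
  rw [Function.comp_apply, pv_lower_fixed m hm, PySem.Str.isIn_eq,
    ← pv_contains_eq_isIn _ _ (by simpa using hlen) (by simpa using hne)]
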